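-- pv_equiv track=rewrite | github.com/MaxLinkle/ADEME | Code/meta.py | neighbors_check
-- ===== SOURCE A (Python) =====
-- def neighbors_check(individual, individual_list):
--     """ Check if all the cities from an individual are actually neighbors """
--     fitness = 0
--     for elem in individual:
--         if individual.count(elem) > 1 and elem != 0:
--             return False, fitness
--
--     for i in range(len(individual_list)):
--         if individual[i] == 0:
--             continue
--         else:
--             if individual_list[i][individual[i+1]] == 0:
--                 return False, fitness
--             else:
--                 fitness += individual_list[i][individual[i+1]]
--                 continue
--     return True, fitness
-- ===== SOURCE B (Python) =====
-- def neighbors_check(individual, individual_list):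
--     """ Check if all the cities from an individual are actually neighbors """
--     s = sorted(individual)
--     if any(a == b and a != 0 for a, b in zip(s, s[1:])):
--         return False, 0
--     fitness = 0
--     i = 0
--     while i < len(individual_list):
--         c = individual[i]
--         if c != 0:
--             d = individual_list[i][individual[i + 1]]
--             if d == 0:
--                 return False, fitness
--             fitness += d
--         i += 1
--     return True, fitness
-- ===== Notes on version B (the rewrite author's own statement) =====
-- stated objective: alternative
-- what changed: Duplicate detection sorts a copy and compares adjacent elements instead of A's repeated list.count scan, and the distance pass is an index-driven while loop binding each distance once instead of A's for-over-range loop that indexes twice.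
import Mathlib
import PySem

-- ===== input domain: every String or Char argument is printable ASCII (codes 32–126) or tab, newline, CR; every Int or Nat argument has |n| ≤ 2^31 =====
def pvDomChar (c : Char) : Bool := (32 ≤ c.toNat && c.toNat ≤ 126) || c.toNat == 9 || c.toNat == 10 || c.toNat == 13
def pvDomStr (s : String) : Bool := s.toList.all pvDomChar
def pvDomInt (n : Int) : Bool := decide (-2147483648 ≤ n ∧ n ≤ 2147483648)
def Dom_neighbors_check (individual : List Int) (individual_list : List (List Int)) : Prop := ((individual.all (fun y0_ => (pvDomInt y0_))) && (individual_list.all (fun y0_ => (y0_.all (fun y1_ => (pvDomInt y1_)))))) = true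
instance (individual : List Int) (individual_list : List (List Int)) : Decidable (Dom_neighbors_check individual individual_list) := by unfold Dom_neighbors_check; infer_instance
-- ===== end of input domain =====

-- B detects nonzero duplicates by sorting a copy and comparing adjacent elements, and restates the
-- distance pass as an index-driven while loop binding each distance once (alternative decomposition,
-- same values and same raising behaviour as A on every input).


-- ===== PORT A =====
-- first loop of A: scan `individual`, return early if some element has count > 1 and is nonzero
def pvDupScanA (full : List Int) : List Int → Bool
  | [] => false
  | e :: rest => if 1 < full.count e ∧ e ≠ 0 then true else pvDupScanA full rest

-- second loop of A over range(len(individual_list)); `none` = an IndexError Python would raise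
def pvLoopA (ind : List Int) (rows : List (List Int)) : Int → List Int → Option (Bool × Int)
  | fitness, [] => some (true, fitness)
  | fitness, i :: is =>
    match PySem.List.pyGet? ind i with
    | none => none
    | some c =>
      if c = 0 then pvLoopA ind rows fitness is
      else
        match PySem.List.pyGet? rows i with
        | none => none
        | some row =>
          match PySem.List.pyGet? ind (i + 1) with
          | none => none
          | some idx =>
            match PySem.List.pyGet? row idx with
            | none => none
            | some d => if d = 0 then some (false, fitness) else pvLoopA ind rows (fitness + d) is

def neighbors_check (individual : List Int) (individual_list : List (List Int)) : Bool × Int :=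
  if pvDupScanA individual individual then (false, 0)
  else
    -- .getD is only the total-function shape of the port: under Pre_ the loop never returns none
    (pvLoopA individual individual_list 0
        (PySem.List.pyRange 0 individual_list.length 1)).getD (false, 0)

-- ===== PORT B =====
-- B's while loop over the index i, recursion on the remaining iteration count
-- (rem = rows.length - i, so rem = 0 is exactly the exit test i < len(rows) failing);
-- `none` = an IndexError Python would raise
def pvWalkB (ind : List Int) (rows : List (List Int)) : Nat → Nat → Int → Option (Bool × Int)
  | 0, _, fitness => some (true, fitness)
  | rem + 1, i, fitness =>
    match PySem.List.pyGet? ind (i : Int) with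
    | none => none
    | some c =>
      if c = 0 then pvWalkB ind rows rem (i + 1) fitness
      else
        match PySem.List.pyGet? rows (i : Int) with
        | none => none
        | some row =>
          match PySem.List.pyGet? ind ((i : Int) + 1) with
          | none => none
          | some d0 =>
            match PySem.List.pyGet? row d0 with
            | none => none
            | some d =>
              if d = 0 then some (false, fitness) else pvWalkB ind rows rem (i + 1) (fitness + d)

def neighbors_check_alt (individual : List Int) (individual_list : List (List Int)) : Bool × Int :=
  let s := PySem.List.sorted individual (fun x => x) false
  if (s.zip (PySem.List.slice s (some 1) none)).any (fun p => p.1 == p.2 && !(p.1 == 0)) then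
    (false, 0)
  else
    -- .getD is only the total-function shape of the port: under Pre_ the walk never returns none
    (pvWalkB individual individual_list individual_list.length 0 0).getD (false, 0)

-- ===== PRECONDITION & SPEC =====
-- Pre_ excludes exactly the inputs on which the Python A raises IndexError: A returns normally iff
-- some nonzero element is duplicated (early return in the first loop), or every position of the
-- second loop that is reached before an early zero-distance return has all its index accesses in
-- range.  (B raises on exactly the same inputs.)
def Pre_neighbors_check (individual : List Int) (individual_list : List (List Int)) : Prop :=
  (∃ e ∈ individual, 1 < individual.count e ∧ e ≠ 0) ∨
  (∀ i ∈ List.range individual_list.length,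
      (∀ j ∈ List.range i,
          ¬ (j < individual.length ∧ individual.getD j 0 ≠ 0 ∧ j + 1 < individual.length ∧
             PySem.Raise.InRange (individual_list.getD j []).length (individual.getD (j + 1) 0) ∧
             (PySem.List.pyGet? (individual_list.getD j []) (individual.getD (j + 1) 0)).getD 1 = 0)) →
      i < individual.length ∧
      (individual.getD i 0 ≠ 0 →
        i + 1 < individual.length ∧
        PySem.Raise.InRange (individual_list.getD i []).length (individual.getD (i + 1) 0)))
instance (individual : List Int) (individual_list : List (List Int)) : Decidable (Pre_neighbors_check individual individual_list) := by unfold Pre_neighbors_check; infer_instance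

def pvWitness_neighbors_check : List Int × List (List Int) := ([1, 0], [[5, 7]])

def Spec_neighbors_check (individual : List Int) (individual_list : List (List Int)) (out : Bool × Int) : Prop := out = neighbors_check_alt individual individual_list
instance (individual : List Int) (individual_list : List (List Int)) (out : Bool × Int) : Decidable (Spec_neighbors_check individual individual_list out) := by unfold Spec_neighbors_check; infer_instance

-- ===== CLAIM (what is proved, stated in full; the proofs are below) =====
def Claim_equal_neighbors_check : Prop := ∀ (individual : List Int) (individual_list : List (List Int)), Dom_neighbors_check individual individual_list → Pre_neighbors_check individual individual_list → Spec_neighbors_check individual individual_list (neighbors_check individual individual_list)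

-- ===== LEMMAS AND PROOFS =====

theorem pvDupScanA_iff (full l : List Int) :
    pvDupScanA full l = true ↔ ∃ e ∈ l, 1 < full.count e ∧ e ≠ 0 := by
  induction l with
  | nil => simp [pvDupScanA]
  | cons e rest ih =>
    simp only [pvDupScanA]
    split_ifs with h
    · simp [h]
    · simp only [List.mem_cons, ih]
      constructor
      · rintro ⟨x, hx, hc⟩; exact ⟨x, Or.inr hx, hc⟩
      · rintro ⟨x, hx | hx, hc⟩
        · exact absurd (hx ▸ hc) h
        · exact ⟨x, hx, hc⟩

-- in a ≤-sorted list with 1 < count e, two copies of e sit adjacently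
theorem pvAdj_of_count (s : List Int) (e : Int) (hs : s.Pairwise (· ≤ ·))
    (hc : 1 < s.count e) :
    ∃ k, ∃ hk : k + 1 < s.length, s[k] = e ∧ s[k + 1] = e := by
  induction s with
  | nil => simp [List.count] at hc
  | cons a t ih =>
    cases t with
    | nil =>
      simp [List.count_cons, List.count_nil] at hc
      split at hc <;> omega
    | cons b u =>
      by_cases hae : a = e
      · by_cases hbe : b = e
        · exact ⟨0, by simp, by simpa using hae, by simpa using hbe⟩
        · -- a = e, b ≠ e: e occurs again in b :: u, hence in u; pairwise forces b = e, contradiction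
          have he : e ∈ b :: u := by
            have : 0 < (b :: u).count e := by
              have := hc
              simp [List.count_cons, hae] at this ⊢
              omega
            exact List.count_pos_iff.mp this
          have heu : e ∈ u := by
            rcases List.mem_cons.mp he with h | h
            · exact absurd h.symm hbe
            · exact h
          have hab : a ≤ b := (List.pairwise_cons.mp hs).1 b (by simp)
          have hbu : b ≤ e := ((List.pairwise_cons.mp ((List.pairwise_cons.mp hs).2)).1) e heu
          have : b = e := le_antisymm hbu (hae ▸ hab)
          exact absurd this hbe
      · have hc' : 1 < (b :: u).count e := by
          simp [List.count_cons, hae] at hc ⊢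
          simpa [hae] using hc
        obtain ⟨k, hk, h1, h2⟩ := ih (List.pairwise_cons.mp hs).2 hc'
        exact ⟨k + 1, by simpa using Nat.succ_lt_succ hk, by simpa using h1, by simpa using h2⟩

-- B's adjacency test on sorted(individual) ↔ A's duplicate condition
theorem pvAdjAny_iff (l : List Int) :
    ((PySem.List.sorted l (fun x => x) false).zip
        (PySem.List.slice (PySem.List.sorted l (fun x => x) false) (some 1) none)).any
        (fun p => p.1 == p.2 && !(p.1 == 0)) = true ↔
      ∃ e ∈ l, 1 < l.count e ∧ e ≠ 0 := by
  set s := PySem.List.sorted l (fun x => x) false with hs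
  have hperm : s.Perm l := PySem.List.sorted_perm l _ _
  rw [PySem.List.slice_from_one]
  constructor
  · intro h
    obtain ⟨p, hp, hcond⟩ := List.any_eq_true.mp h
    obtain ⟨k, hk, hpk⟩ := List.mem_iff_getElem.mp hp
    have hlen : s.tail.length = s.length - 1 := List.length_tail
    rw [List.getElem_zip] at hpk
    have hk2 : k + 1 < s.length := by
      have := hk; simp [List.length_zip, hlen] at this; omega
    have htl : s.tail[k]'(by omega) = s[k + 1] := by
      simp [List.getElem_tail]
    have heq : s[k]'(by omega) = s[k + 1] ∧ s[k]'(by omega) ≠ 0 := by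
      rw [← hpk] at hcond
      simp at hcond
      exact ⟨hcond.1, hcond.2⟩
    refine ⟨s[k]'(by omega), hperm.mem_iff.mp (List.getElem_mem _), ?_, heq.2⟩
    rw [← hperm.count_eq]
    have hsub : List.Sublist (s.drop k) s := List.drop_sublist k s
    have hdk : s.drop k = s[k]'(by omega) :: s.drop (k + 1) :=
      List.drop_eq_getElem_cons (by omega)
    have hdk1 : s.drop (k + 1) = s[k + 1] :: s.drop (k + 2) :=
      List.drop_eq_getElem_cons hk2
    have h2 : 1 < (s.drop k).count (s[k]'(by omega)) := by
      rw [hdk, hdk1]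
      simp [← heq.1]
    exact lt_of_lt_of_le h2 (hsub.count_le _)
  · rintro ⟨e, he, hc, hne⟩
    have hc' : 1 < s.count e := by rw [hperm.count_eq]; exact hc
    obtain ⟨k, hk, h1, h2⟩ := pvAdj_of_count s e (PySem.List.sorted_pairwise l _) hc'
    refine List.any_eq_true.mpr ⟨(s[k]'(by omega), s.tail[k]'(by simp [List.length_tail]; omega)), ?_, ?_⟩
    · refine List.mem_iff_getElem.mpr ⟨k, ?_, ?_⟩
      · simp [List.length_zip, List.length_tail]; omega
      · rw [List.getElem_zip]
    · have : s.tail[k]'(by simp [List.length_tail]; omega) = s[k + 1] := by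
        simp [List.getElem_tail]
      simp [this, h1, h2, hne]

-- A's indexed loop over pyRange i..n and B's while-loop recursion from i compute the same option
theorem pvLoopA_eq_walkB (ind : List Int) (rows : List (List Int)) :
    ∀ (k i : Nat) (f : Int), i + k = rows.length →
      pvLoopA ind rows f (PySem.List.pyRange (i : Int) (rows.length : Int) 1)
        = pvWalkB ind rows k i f := by
  intro k
  induction k with
  | zero =>
    intro i f h
    rw [PySem.List.pyRange_one_eq_nil (by omega)]
    rfl
  | succ k ih =>
    intro i f h
    rw [PySem.List.pyRange_one_cons (by omega)]
    simp only [pvLoopA, pvWalkB]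
    have hcast : (i : Int) + 1 = ((i + 1 : Nat) : Int) := by push_cast; ring
    cases hg : PySem.List.pyGet? ind (i : Int) with
    | none => rfl
    | some c =>
      by_cases hc : c = 0
      · simp only [hc, reduceIte]
        rw [hcast]
        exact ih (i + 1) f (by omega)
      · simp only [if_neg hc]
        cases hrow : PySem.List.pyGet? rows (i : Int) with
        | none => rfl
        | some row =>
          cases hidx : PySem.List.pyGet? ind ((i : Int) + 1) with
          | none => rfl
          | some idx =>
            cases hd : PySem.List.pyGet? row idx with
            | none => simp only [hd]
            | some d =>
              simp only [hd]
              by_cases hd0 : d = 0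
              · simp [hd0]
              · simp only [if_neg hd0]
                rw [hcast]
                exact ih (i + 1) (f + d) (by omega)

-- ===== VERDICT (by name: the statement is the Claim_ definition above) =====
theorem neighbors_check_spec : Claim_equal_neighbors_check := by
  intro ind rows _hdom _hpre
  unfold Spec_neighbors_check neighbors_check neighbors_check_alt
  by_cases hdup : ∃ e ∈ ind, 1 < ind.count e ∧ e ≠ 0
  · rw [if_pos ((pvDupScanA_iff ind ind).mpr hdup),
        if_pos ((pvAdjAny_iff ind).mpr hdup)]
  · rw [if_neg (fun h => hdup ((pvDupScanA_iff ind ind).mp h)),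
        if_neg (fun h => hdup ((pvAdjAny_iff ind).mp h))]
    have hw := pvLoopA_eq_walkB ind rows rows.length 0 0 (by omega)
    rw [Nat.cast_zero] at hw
    rw [hw]
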